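-- pv_equiv track=rewrite | github.com/pytorch/pytorch | .venv311/lib/python3.11/site-packages/networkx/algorithms/threshold.py | is_threshold_sequence
-- ===== SOURCE A (Python) =====
-- def is_threshold_sequence(degree_sequence):
--     """
--     Returns True if the sequence is a threshold degree sequence.
--
--     Uses the property that a threshold graph must be constructed by
--     adding either dominating or isolated nodes. Thus, it can be
--     deconstructed iteratively by removing a node of degree zero or a
--     node that connects to the remaining nodes.  If this deconstruction
--     fails then the sequence is not a threshold sequence.
--     """
--     ds = degree_sequence[:]  # get a copy so we don't destroy original
--     ds.sort()
--     while ds: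
--         if ds[0] == 0:  # if isolated node
--             ds.pop(0)  # remove it
--             continue
--         if ds[-1] != len(ds) - 1:  # is the largest degree node dominating?
--             return False  # no, not a threshold degree sequence
--         ds.pop()  # yes, largest is the dominating node
--         ds = [d - 1 for d in ds]  # remove it and decrement all degrees
--     return True
-- ===== SOURCE B (Python) =====
-- def is_threshold_sequence(degree_sequence):
--     """Closed-form test: a sequence is threshold iff its sorted-descending form
--     equals its own corrected conjugate (Ferrers-diagram self-conjugacy)."""
--     d = sorted(degree_sequence, reverse=True)
--     return all(
--         x == min(k, sum(1 for y in d if y >= k))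
--              + max(sum(1 for y in d if y >= k + 1) - (k + 1), 0)
--         for k, x in enumerate(d)
--     )
-- ===== Notes on version B (the rewrite author's own statement) =====
-- stated objective: simpler
-- what changed: Replaces A's iterative deconstruction loop (repeatedly strip a zero or remove a dominating node and decrement the whole list) by the closed-form threshold characterization: sort once descending and check every position against the corrected conjugate (Ferrers self-conjugacy), d[k] == min(k, #{y>=k}) + max(#{y>=k+1}-(k+1), 0).
import Mathlib
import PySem

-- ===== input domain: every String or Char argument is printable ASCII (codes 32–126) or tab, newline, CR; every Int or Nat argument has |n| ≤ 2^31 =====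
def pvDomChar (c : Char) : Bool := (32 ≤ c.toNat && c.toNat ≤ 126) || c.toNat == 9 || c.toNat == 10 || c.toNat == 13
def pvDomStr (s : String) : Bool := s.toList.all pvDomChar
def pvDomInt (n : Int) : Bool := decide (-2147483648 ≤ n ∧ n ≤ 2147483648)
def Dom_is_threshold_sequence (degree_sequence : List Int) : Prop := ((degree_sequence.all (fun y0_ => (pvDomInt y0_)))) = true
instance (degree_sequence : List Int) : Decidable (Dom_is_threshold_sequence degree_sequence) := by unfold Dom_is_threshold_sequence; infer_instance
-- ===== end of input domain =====

-- B replaces A's deconstruction loop by the closed-form corrected-conjugate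
-- (Ferrers self-conjugacy) position test on the descending sort (simpler, same cost).

-- ===== PORT A =====
-- A's while loop: pop a zero from the front, or check that the last element is
-- dominating (ds[-1], ported as getLastD of the tail), pop it and decrement
-- every remaining degree.
def pvAGo : List Int → Bool
  | [] => true
  | d :: rest =>
    if d == 0 then pvAGo rest
    else if rest.getLastD d ≠ (rest.length : Int) then false
    else pvAGo (((d :: rest).dropLast).map (fun x => x - 1))
termination_by l => l.length
decreasing_by all_goals simp

def is_threshold_sequence (degree_sequence : List Int) : Bool :=
  pvAGo (PySem.List.sorted degree_sequence (fun x => x) false)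

-- ===== PORT B =====
-- Source B: sort descending, then check every enumerated position k against the
-- corrected conjugate value min(k, #{y>=k}) + max(#{y>=k+1} - (k+1), 0)
-- (the two generator sums of 1s are countP).
def is_threshold_sequence_alt (degree_sequence : List Int) : Bool :=
  let d := PySem.List.sorted degree_sequence (fun x => x) true
  (PySem.List.enumerate d 0).all (fun kx =>
    kx.2 == min kx.1 ((d.countP (fun y => decide (kx.1 ≤ y)) : Int))
      + max ((d.countP (fun y => decide (kx.1 + 1 ≤ y)) : Int) - (kx.1 + 1)) 0)

-- ===== PRECONDITION & SPEC =====
def Spec_is_threshold_sequence (degree_sequence : List Int) (out : Bool) : Prop := out = is_threshold_sequence_alt degree_sequence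
instance (degree_sequence : List Int) (out : Bool) : Decidable (Spec_is_threshold_sequence degree_sequence out) := by unfold Spec_is_threshold_sequence; infer_instance

-- ===== CLAIM (what is proved, stated in full; the proofs are below) =====
def Claim_equal_is_threshold_sequence : Prop := ∀ (degree_sequence : List Int), Dom_is_threshold_sequence degree_sequence → Spec_is_threshold_sequence degree_sequence (is_threshold_sequence degree_sequence)

-- ===== LEMMAS AND PROOFS =====

-- #{y in e : t <= y}, as an Int
def pvG (e : List Int) (t : Int) : Int := (e.countP (fun y => decide (t ≤ y)) : Int)
-- the corrected-conjugate value B compares position k against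
def pvPhi (e : List Int) (k : Int) : Int := min k (pvG e k) + max (pvG e (k + 1) - (k + 1)) 0
-- B's check on an already (descending-)sorted list
def pvChk (e : List Int) : Bool := (PySem.List.enumerate e 0).all (fun kx => kx.2 == pvPhi e kx.1)

theorem alt_eq_chk (l : List Int) :
    is_threshold_sequence_alt l = pvChk (PySem.List.sorted l (fun x => x) true) := rfl

theorem pvG_nonneg (e : List Int) (t : Int) : 0 ≤ pvG e t := Int.natCast_nonneg _

theorem pvG_le_length (e : List Int) (t : Int) : pvG e t ≤ (e.length : Int) := by
  have := List.countP_le_length (l := e) (p := fun y => decide (t ≤ y))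
  unfold pvG; exact_mod_cast this

theorem pvG_eq_zero (e : List Int) (t : Int) (h : ∀ x ∈ e, x < t) : pvG e t = 0 := by
  unfold pvG
  have : e.countP (fun y => decide (t ≤ y)) = 0 := by
    rw [List.countP_eq_zero]
    intro x hx
    simpa using (h x hx)
  simp [this]

theorem pvG_eq_length (e : List Int) (t : Int) (h : ∀ x ∈ e, t ≤ x) : pvG e t = (e.length : Int) := by
  unfold pvG
  have : e.countP (fun y => decide (t ≤ y)) = e.length := by
    rw [List.countP_eq_length]
    intro x hx
    simpa using (h x hx)
  simp [this]

theorem pvG_cons (a : Int) (e : List Int) (t : Int) :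
    pvG (a :: e) t = pvG e t + (if t ≤ a then 1 else 0) := by
  unfold pvG
  rw [List.countP_cons]
  by_cases h : t ≤ a <;> simp [h]

theorem pvG_append_zero (e : List Int) (t : Int) :
    pvG (e ++ [0]) t = pvG e t + (if t ≤ 0 then 1 else 0) := by
  unfold pvG
  rw [List.countP_append]
  by_cases h : t ≤ (0 : Int) <;> simp [h]

theorem pvG_map_sub_one (e : List Int) (t : Int) :
    pvG (e.map (fun x => x - 1)) t = pvG e (t + 1) := by
  unfold pvG
  rw [List.countP_map]
  congr 1
  apply List.countP_congr
  intro x _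
  simp only [Function.comp]
  simp only [decide_eq_true_eq]
  omega

-- any negative member falsifies B's check (the conjugate value is never negative)
theorem pvChk_false_of_neg (e : List Int) (x : Int) (hx : x ∈ e) (hneg : x < 0) :
    pvChk e = false := by
  obtain ⟨j, hj, rfl⟩ := List.mem_iff_getElem.mp hx
  apply List.all_eq_false.mpr
  refine ⟨((0 : Int) + j, e[j]), ?_, ?_⟩
  · exact (PySem.List.mem_enumerate_iff e 0 _).mpr ⟨j, hj, rfl⟩
  · have h1 : 0 ≤ pvG e ((0 : Int) + j) := pvG_nonneg _ _
    have h2 : 0 ≤ pvG e ((0 : Int) + j + 1) := pvG_nonneg _ _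
    have h3 : (0 : Int) ≤ (0 : Int) + j := by positivity
    simp only [pvPhi, beq_iff_eq]
    intro hcontr
    omega

-- all members ≥ 1 and the head wrong: B's check fails at position 0
theorem pvChk_false_of_head_mismatch (M : Int) (e₀ : List Int)
    (h1 : ∀ x ∈ M :: e₀, 1 ≤ x) (hM : M ≠ (e₀.length : Int)) :
    pvChk (M :: e₀) = false := by
  have hall : pvG (M :: e₀) (0 + 1) = ((M :: e₀).length : Int) :=
    pvG_eq_length _ _ (fun x hx => by have := h1 x hx; omega)
  have hlen : ((M :: e₀).length : Int) = (e₀.length : Int) + 1 := by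
    simp [List.length_cons]
  apply List.all_eq_false.mpr
  refine ⟨((0 : Int), M), ?_, ?_⟩
  · rw [PySem.List.enumerate_cons]; exact List.mem_cons_self
  · have h0 : 0 ≤ pvG (M :: e₀) 0 := pvG_nonneg _ _
    simp only [pvPhi, beq_iff_eq]
    intro hcontr
    omega

-- pointwise congruence between two enumerated alls with shifted start indices
theorem all_enumerate_congr (xs : List Int) (F G : Int × Int → Bool) :
    ∀ (ys : List Int) (s t : Int), ys.length = xs.length →
    (∀ (j : Nat), j < xs.length → F (s + j, xs.getD j 0) = G (t + j, ys.getD j 0)) →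
    (PySem.List.enumerate xs s).all F = (PySem.List.enumerate ys t).all G := by
  induction xs with
  | nil =>
    intro ys s t hlen _
    have : ys = [] := List.eq_nil_of_length_eq_zero hlen
    subst this; rfl
  | cons a xs ih =>
    intro ys s t hlen h
    cases ys with
    | nil => simp at hlen
    | cons b ys =>
      rw [PySem.List.enumerate_cons, PySem.List.enumerate_cons, List.all_cons, List.all_cons]
      have h0 := h 0 (by simp)
      simp only [List.getD_cons_zero, Nat.cast_zero, add_zero] at h0
      rw [h0]
      congr 1
      apply ih ys (s + 1) (t + 1) (by simpa using hlen)
      intro j hj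
      have hstep := h (j + 1) (by simpa using Nat.succ_lt_succ hj)
      simp only [List.getD_cons_succ] at hstep
      push_cast at hstep
      rw [show s + 1 + (j : Int) = s + ((j : Int) + 1) from by ring,
          show t + 1 + (j : Int) = t + ((j : Int) + 1) from by ring]
      exact hstep

-- appending a trailing 0 to a descending, nonnegative list does not change B's check
theorem pvChk_append_zero (e : List Int)
    (hpw : e.Pairwise (fun a b => b ≤ a)) (h0 : ∀ x ∈ e, 0 ≤ x) :
    pvChk (e ++ [0]) = pvChk e := by
  have phi_eq : ∀ j : Int, 0 ≤ j → pvPhi (e ++ [0]) j = pvPhi e j := by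
    intro j hj
    have n1 := pvG_nonneg e j
    have n2 := pvG_nonneg e (j + 1)
    simp only [pvPhi, pvG_append_zero]
    split_ifs <;> omega
  have henum : PySem.List.enumerate (e ++ [0]) 0
      = PySem.List.enumerate e 0 ++ [((0 : Int) + e.length, 0)] := by
    rw [PySem.List.enumerate_append]; rfl
  have hfirst : (PySem.List.enumerate e 0).all (fun kx => kx.2 == pvPhi (e ++ [0]) kx.1)
      = pvChk e := by
    unfold pvChk
    apply all_enumerate_congr e _ _ e 0 0 rfl
    intro j hj
    show (e.getD j 0 == pvPhi (e ++ [0]) (0 + (j : Int)))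
        = (e.getD j 0 == pvPhi e (0 + (j : Int)))
    rw [phi_eq _ (by positivity)]
  rw [pvChk, henum, List.all_append, hfirst]
  by_cases hc : pvChk e = true
  · rw [hc, Bool.true_and]
    simp only [List.all_cons, List.all_nil, Bool.and_true, zero_add, beq_iff_eq]
    cases e with
    | nil => decide
    | cons M e₁ =>
      have hM : M = pvPhi (M :: e₁) 0 := by
        have hmem0 : ((0 : Int), M) ∈ PySem.List.enumerate (M :: e₁) 0 := by
          rw [PySem.List.enumerate_cons]; exact List.mem_cons_self
        have := List.all_eq_true.mp hc _ hmem0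
        simpa using this
      have hG0 := pvG_nonneg (M :: e₁) 0
      have hG1 := pvG_nonneg (M :: e₁) (0 + 1)
      have hGle := pvG_le_length (M :: e₁) (0 + 1)
      have hlen1 : ((M :: e₁).length : Int) = (e₁.length : Int) + 1 := by
        simp [List.length_cons]
      have hMle : M ≤ ((M :: e₁).length : Int) - 1 := by
        simp only [pvPhi] at hM
        omega
      have hmem : ∀ x ∈ M :: e₁, x ≤ M := by
        intro x hx
        rcases List.mem_cons.mp hx with rfl | hx
        · exact le_refl x
        · exact (List.pairwise_cons.mp hpw).1 x hx
      have hz1 : pvG (M :: e₁) (((M :: e₁).length : Int)) = 0 :=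
        pvG_eq_zero _ _ (fun x hx => by have := hmem x hx; omega)
      have hz2 : pvG (M :: e₁) (((M :: e₁).length : Int) + 1) = 0 :=
        pvG_eq_zero _ _ (fun x hx => by have := hmem x hx; omega)
      simp only [pvPhi, pvG_append_zero]
      split_ifs <;> omega
  · simp only [Bool.not_eq_true] at hc
    rw [hc, Bool.false_and]

-- removing the dominating head (and decrementing the rest) preserves B's check
theorem pvChk_step (M : Int) (e₀ : List Int)
    (hpw : (M :: e₀).Pairwise (fun a b => b ≤ a))
    (h1 : ∀ x ∈ M :: e₀, 1 ≤ x)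
    (hM : M = (e₀.length : Int)) :
    pvChk (M :: e₀) = pvChk (e₀.map (fun x => x - 1)) := by
  have hmem : ∀ x ∈ e₀, x ≤ M := (List.pairwise_cons.mp hpw).1
  have hz0 : pvG e₀ ((e₀.length : Int) + 1) = 0 :=
    pvG_eq_zero _ _ (fun x hx => by have := hmem x hx; omega)
  rw [pvChk, PySem.List.enumerate_cons, List.all_cons]
  have hall : pvG (M :: e₀) (0 + 1) = ((M :: e₀).length : Int) :=
    pvG_eq_length _ _ (fun x hx => by have := h1 x hx; omega)
  have hlen1 : ((M :: e₀).length : Int) = (e₀.length : Int) + 1 := by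
    simp [List.length_cons]
  have hhead : (M == pvPhi (M :: e₀) 0) = true := by
    have hG0 := pvG_nonneg (M :: e₀) 0
    simp only [pvPhi, beq_iff_eq]
    omega
  rw [hhead, Bool.true_and, pvChk]
  apply all_enumerate_congr e₀ _ _ (e₀.map (fun x => x - 1)) (0 + 1) 0 (by simp)
  intro j hj
  have hg1 : e₀.getD j 0 = e₀[j] := List.getD_eq_getElem _ _ hj
  have hg2 : (e₀.map (fun x => x - 1)).getD j 0 = e₀[j] - 1 := by
    rw [List.getD_eq_getElem _ _ (by simpa using hj), List.getElem_map]
  show (e₀.getD j 0 == pvPhi (M :: e₀) (0 + 1 + (j : Int)))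
      = ((e₀.map (fun x => x - 1)).getD j 0
          == pvPhi (e₀.map (fun x => x - 1)) (0 + (j : Int)))
  rw [hg1, hg2,
      show (0 : Int) + 1 + (j : Int) = (j : Int) + 1 from by ring,
      show (0 : Int) + (j : Int) = (j : Int) from by ring]
  have hja : (j : Int) < (e₀.length : Int) := by exact_mod_cast hj
  have key : pvPhi (e₀.map (fun x => x - 1)) (j : Int)
      = pvPhi (M :: e₀) ((j : Int) + 1) - 1 := by
    have hn1 := pvG_nonneg e₀ ((j : Int) + 1)
    simp only [pvPhi, pvG_map_sub_one, pvG_cons]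
    split_ifs with hc1 hc2
    · omega
    · -- ¬(j+1+1 ≤ M): then j+1+1 = |e₀|+1 and the count above the head is 0
      have he : (j : Int) + 1 + 1 = (e₀.length : Int) + 1 := by omega
      rw [he, hz0]
      omega
    · omega
    · omega
  rw [key]
  by_cases he : e₀[j] = pvPhi (M :: e₀) ((j : Int) + 1)
  · simp [he]
  · have hne : ¬ (e₀[j] - 1 = pvPhi (M :: e₀) ((j : Int) + 1) - 1) := by omega
    simp [he, hne]

-- decomposition of a nonempty list as getLastD-head of its reverse
theorem reverse_cons_getLastD (d : Int) (rest : List Int) :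
    (d :: rest).reverse = (rest.getLastD d) :: ((d :: rest).dropLast).reverse := by
  obtain ⟨ys, y, hy⟩ := (List.eq_nil_or_concat (d :: rest)).resolve_left (by simp)
  rw [List.concat_eq_append] at hy
  have hgl : rest.getLastD d = y := by
    have h1 : (d :: rest).getLastD d = y := by rw [hy]; exact List.getLastD_concat
    rw [← h1, List.getLastD_cons]
  rw [hy, hgl]
  simp

-- the core induction: A's deconstruction on a sorted-ascending list equals B's
-- conjugate check on its reverse (the descending sort)
theorem pvAGo_eq_chk : ∀ (n : Nat) (l : List Int), l.length = n → l.Pairwise (· ≤ ·) →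
    pvAGo l = pvChk l.reverse := by
  intro n
  induction n using Nat.strong_induction_on with
  | _ n ih =>
    intro l hn hpw
    match l, hn with
    | [], _ => simp [pvAGo, pvChk]
    | d :: rest, hn =>
      have hlen : rest.length = n - 1 ∧ 1 ≤ n := by simp at hn; omega
      rw [pvAGo]
      have hrestpw : rest.Pairwise (· ≤ ·) := (List.pairwise_cons.mp hpw).2
      have hge : ∀ x ∈ rest, d ≤ x := (List.pairwise_cons.mp hpw).1
      by_cases hd : d = 0
      · rw [if_pos (by simp [hd])]
        rw [ih (n - 1) (by omega) rest hlen.1 hrestpw]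
        subst hd
        rw [List.reverse_cons]
        rw [pvChk_append_zero]
        · exact List.pairwise_reverse.mpr (by simpa using hrestpw)
        · intro x hx
          exact hge x (List.mem_reverse.mp hx)
      · rw [if_neg (by simp [hd])]
        rw [reverse_cons_getLastD d rest]
        set x := rest.getLastD d with hx
        have hxmem : x ∈ d :: rest := by
          have hm : x ∈ (d :: rest).reverse := by
            rw [reverse_cons_getLastD d rest]; exact List.mem_cons_self
          exact List.mem_reverse.mp hm
        by_cases hdom : x = (rest.length : Int)
        · -- dominating: recurse
          have hnz : rest ≠ [] := by
            intro hnil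
            rw [hnil] at hx hdom
            simp [hx] at hdom
            omega
          rw [if_neg (not_not_intro hdom)]
          have hrec := ih (n - 1) (by omega)
            (((d :: rest).dropLast).map (fun y => y - 1))
            (by simp; omega)
            (List.Pairwise.map (fun y => y - 1) (fun a b (hab : a ≤ b) => by show a - 1 ≤ b - 1; omega)
              (hpw.sublist (List.dropLast_sublist _)))
          rw [hrec, ← List.map_reverse]
          by_cases hdneg : d < 0
          · -- a negative element on both sides: both checks fail
            have hl : pvChk (x :: ((d :: rest).dropLast).reverse) = false := by
              apply pvChk_false_of_neg _ d _ hdneg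
              have hmem : d ∈ (d :: rest).reverse := by simp
              rw [reverse_cons_getLastD d rest] at hmem
              exact hmem
            have hr : pvChk ((((d :: rest).dropLast).reverse).map (fun y => y - 1)) = false := by
              apply pvChk_false_of_neg _ (d - 1) _ (by omega)
              apply List.mem_map_of_mem
              rw [List.mem_reverse]
              cases rest with
              | nil => exact absurd rfl hnz
              | cons b t => simp
            rw [hl, hr]
          · -- all elements ≥ 1: the step lemma applies
            have hone : ∀ y ∈ x :: ((d :: rest).dropLast).reverse, 1 ≤ y := by
              intro y hy
              rw [← reverse_cons_getLastD d rest, List.mem_reverse] at hy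
              rcases List.mem_cons.mp hy with rfl | hy
              · omega
              · have := hge y hy; omega
            rw [pvChk_step x _ ?_ hone (by rw [hdom]; simp)]
            rw [← reverse_cons_getLastD d rest]
            apply List.pairwise_reverse.mpr
            simpa using hpw
        · -- not dominating: A returns false, and B's check fails too
          rw [if_pos hdom]
          by_cases hdneg : d < 0
          · symm
            apply pvChk_false_of_neg _ d _ hdneg
            have hmem : d ∈ (d :: rest).reverse := by simp
            rw [reverse_cons_getLastD d rest] at hmem
            exact hmem
          · symm
            apply pvChk_false_of_head_mismatch
            · intro y hy
              rw [← reverse_cons_getLastD d rest, List.mem_reverse] at hy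
              rcases List.mem_cons.mp hy with rfl | hy
              · omega
              · have := hge y hy; omega
            · rw [List.length_reverse]
              simpa using hdom

-- the descending sort is the reverse of the ascending sort (ints, identity key)
theorem sorted_true_eq_reverse (l : List Int) :
    PySem.List.sorted l (fun x => x) true = (PySem.List.sorted l (fun x => x) false).reverse := by
  apply List.Perm.eq_of_pairwise (le := fun a b : Int => b ≤ a)
    (fun a b _ _ h1 h2 => le_antisymm h2 h1)
  · exact PySem.List.sorted_pairwise_rev l (fun x => x)
  · exact List.pairwise_reverse.mpr (by simpa using PySem.List.sorted_pairwise l (fun x => x))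
  · exact (PySem.List.sorted_perm l (fun x => x) true).trans
      ((PySem.List.sorted_perm l (fun x => x) false).symm.trans (List.reverse_perm _).symm)

-- ===== VERDICT (by name: the statement is the Claim_ definition above) =====
theorem is_threshold_sequence_spec : Claim_equal_is_threshold_sequence := by
  intro l _
  unfold Spec_is_threshold_sequence is_threshold_sequence
  rw [alt_eq_chk, sorted_true_eq_reverse]
  exact pvAGo_eq_chk (PySem.List.sorted l (fun x => x) false).length _ rfl
    (by simpa using PySem.List.sorted_pairwise l (fun x => x))
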